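-- pv_equiv track=rewrite | github.com/seokiller3/Python_START | HW_9/task_calc.py | find_expression
-- ===== SOURCE A (Python) =====
-- def find_expression(data: str, search_operand: list):
--     """Поиск оператора"""
--     ind_s = 0
--     ind_f = 0
--     ind_o = 0
--     operands_fool = ["+", "-", "/", "*"]
--     operands = ["+", "-", "/", "*"]
--     for op in search_operand:
--         operands.remove(op)
--     found = False
--
--     for i, sym in enumerate(data):
--         if i == 0 and sym == "-":
--             continue
--         if not found and sym in operands:
--             ind_s = i + 1
--         elif found and sym in operands_fool:
--             ind_f = i - 1
--             return ind_s, ind_f, ind_o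
--
--         elif sym in search_operand:
--             found = True
--             ind_o = i
--             ind_f = len(data) - 1
--
--     return ind_s, ind_f, ind_o
-- ===== SOURCE B (Python) =====
-- def find_expression(data: str, search_operand: list):
--     """Поиск оператора"""
--     all_ops = "+-/*"
--     operands = ["+", "-", "/", "*"]
--     for op in search_operand:
--         operands.remove(op)
--
--     def ok(i):  # a '-' at index 0 is a sign, never an operator
--         return i != 0 or data[0] != "-"
--
--     ind_o = next((i for i, c in enumerate(data) if ok(i) and c in search_operand), None)
--     if ind_o is None:
--         ind_s = max((i + 1 for i, c in enumerate(data) if ok(i) and c in operands), default=0)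
--         return ind_s, 0, 0
--     ind_s = max((i + 1 for i, c in enumerate(data) if i < ind_o and ok(i) and c in operands), default=0)
--     ind_f = next((i - 1 for i, c in enumerate(data) if i > ind_o and c in all_ops), len(data) - 1)
--     return ind_s, ind_f, ind_o
-- ===== Notes on version B (the rewrite author's own statement) =====
-- stated objective: alternative
-- what changed: Replaced A's single stateful scan with a found-flag and four mutable indices by three independent declarative scans: locate the pivot operator first, then the last operand boundary before it and the first operator after it.
import Mathlib
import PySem

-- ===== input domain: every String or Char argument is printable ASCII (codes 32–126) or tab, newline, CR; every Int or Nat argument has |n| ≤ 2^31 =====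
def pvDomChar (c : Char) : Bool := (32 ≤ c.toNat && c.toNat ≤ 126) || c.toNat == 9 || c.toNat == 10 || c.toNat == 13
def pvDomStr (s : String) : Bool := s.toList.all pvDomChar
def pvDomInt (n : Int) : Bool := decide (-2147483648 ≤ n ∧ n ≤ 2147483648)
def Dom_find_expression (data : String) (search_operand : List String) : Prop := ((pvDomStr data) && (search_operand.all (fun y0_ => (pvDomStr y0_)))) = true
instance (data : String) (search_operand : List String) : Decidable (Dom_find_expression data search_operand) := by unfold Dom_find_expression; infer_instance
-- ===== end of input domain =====

-- B replaces A's single stateful pass with a `found` flag by three independent scans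
-- (find the pivot operator, then the last preceding operand-boundary and the first
-- following operator); equal return values proved on Pre_ (A raises ValueError outside it).

-- ===== PORT A =====
-- `sym in operands` for a character sym against a list of 1-char strings
def pvMemS (l : List String) (c : Char) : Bool := l.contains (String.singleton c)

-- the `for i, sym in enumerate(data)` loop of A, state (ind_s, ind_f, ind_o, found)
def pvLoopA (so ops opsF : List String) (len : Int) :
    List Char → Int → Int → Int → Int → Bool → Int × Int × Int
  | [], _, s, f, o, _ => (s, f, o)
  | c :: cs, i, s, f, o, found =>
    if i = 0 ∧ c = '-' then pvLoopA so ops opsF len cs (i+1) s f o found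
    else if !found && pvMemS ops c then pvLoopA so ops opsF len cs (i+1) (i+1) f o found
    else if found && pvMemS opsF c then (s, i-1, o)
    else if pvMemS so c then pvLoopA so ops opsF len cs (i+1) s (len-1) i true
    else pvLoopA so ops opsF len cs (i+1) s f o found

def find_expression (data : String) (search_operand : List String) : Int × Int × Int :=
  let operands_fool : List String := ["+", "-", "/", "*"]
  -- `for op in search_operand: operands.remove(op)`; remove? = none is Python's ValueError,
  -- excluded by Pre_ (getD keeps the port total)
  let operands : List String :=
    search_operand.foldl (fun acc op => (PySem.List.remove? acc op).getD acc) ["+", "-", "/", "*"]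
  pvLoopA search_operand operands operands_fool (data.toList.length : Int) data.toList 0 0 0 0 false

-- ===== PORT B =====
-- Source B's `ok(i)`: a '-' at index 0 is a sign, never an operator (c0 = data[0] as head?)
def pvOk (c0 : Option Char) (i : Int) : Bool := i != 0 || !(c0 == some '-')

-- first i with ok(i) and data[i] in search_operand (None if there is none)
def pvPivotB (c0 : Option Char) (so : List String) : List Char → Int → Option Int
  | [], _ => none
  | c :: cs, i => if pvOk c0 i && pvMemS so c then some i else pvPivotB c0 so cs (i+1)

-- max(i+1 for qualifying i, default acc) over the whole string
def pvMaxAll (c0 : Option Char) (operands : List String) : List Char → Int → Int → Int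
  | [], _, acc => acc
  | c :: cs, i, acc =>
    pvMaxAll c0 operands cs (i+1) (if pvOk c0 i && pvMemS operands c then max acc (i+1) else acc)

-- same but restricted to indices i < j
def pvMaxBefore (c0 : Option Char) (operands : List String) (j : Int) : List Char → Int → Int → Int
  | [], _, acc => acc
  | c :: cs, i, acc =>
    pvMaxBefore c0 operands j cs (i+1)
      (if decide (i < j) && pvOk c0 i && pvMemS operands c then max acc (i+1) else acc)

-- first i > j with data[i] in "+-/*", returning i-1 (c is always a single char, so
-- Python's `c in all_ops` substring test is exactly char membership)
def pvFindAfter (allOps : List Char) (j : Int) : List Char → Int → Option Int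
  | [], _ => none
  | c :: cs, i => if decide (j < i) && allOps.contains c then some (i-1) else pvFindAfter allOps j cs (i+1)

def find_expression_alt (data : String) (search_operand : List String) : Int × Int × Int :=
  let all_ops : List Char := "+-/*".toList
  -- Source B keeps A's operand-table construction: `operands.remove(op)` for each op
  let operands : List String :=
    search_operand.foldl (fun acc op => (PySem.List.remove? acc op).getD acc) ["+", "-", "/", "*"]
  let chars := data.toList
  let c0 := chars.head?
  match pvPivotB c0 search_operand chars 0 with
  | none => (pvMaxAll c0 operands chars 0 0, 0, 0)
  | some o =>
      (pvMaxBefore c0 operands o chars 0 0,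
       (pvFindAfter all_ops o chars 0).getD ((chars.length : Int) - 1),
       o)

-- ===== PRECONDITION & SPEC =====
-- Pre_ excludes exactly the inputs where A raises ValueError: `operands.remove(op)` needs
-- every element of search_operand to be one of "+","-","/","*" and no duplicates.
def Pre_find_expression (data : String) (search_operand : List String) : Prop :=
  search_operand.Nodup ∧ ∀ s ∈ search_operand, s ∈ (["+", "-", "/", "*"] : List String)
instance (data : String) (search_operand : List String) : Decidable (Pre_find_expression data search_operand) := by unfold Pre_find_expression; infer_instance
def pvWitness_find_expression : String × List String := ("1+2*3", ["*"])

def Spec_find_expression (data : String) (search_operand : List String) (out : Int × Int × Int) : Prop := out = find_expression_alt data search_operand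
instance (data : String) (search_operand : List String) (out : Int × Int × Int) : Decidable (Spec_find_expression data search_operand out) := by unfold Spec_find_expression; infer_instance

-- ===== CLAIM (what is proved, stated in full; the proofs are below) =====
def Claim_equal_find_expression : Prop := ∀ (data : String) (search_operand : List String), Dom_find_expression data search_operand → Pre_find_expression data search_operand → Spec_find_expression data search_operand (find_expression data search_operand)

-- ===== LEMMAS AND PROOFS =====

theorem pivot_ge (c0 : Option Char) (so : List String) :
    ∀ (cs : List Char) (i j : Int), pvPivotB c0 so cs i = some j → i ≤ j := by
  intro cs
  induction cs with
  | nil => intro i j h; simp [pvPivotB] at h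
  | cons c cs ih =>
    intro i j h
    simp only [pvPivotB] at h
    split at h
    · simp only [Option.some.injEq] at h; omega
    · have := ih (i+1) j h; omega

theorem maxBefore_past (c0 : Option Char) (opsC : List String) :
    ∀ (cs : List Char) (i acc j : Int), j ≤ i → pvMaxBefore c0 ops j cs i acc = acc := by
  intro cs
  induction cs with
  | nil => intro i acc j _; rfl
  | cons c cs ih =>
    intro i acc j hji
    simp only [pvMaxBefore]
    have hd : decide (i < j) = false := by simp; omega
    rw [hd]
    simp only [Bool.false_and, if_false]
    exact ih (i+1) acc j (by omega)

theorem loopA_found (so ops opsF : List String) (allC : List Char) (len : Int)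
    (hfool : ∀ c, pvMemS opsF c = allC.contains c)
    (hsub : ∀ c, pvMemS so c = true → allC.contains c = true) :
    ∀ (cs : List Char) (i s o : Int), 1 ≤ i → o < i →
      pvLoopA so ops opsF len cs i s (len-1) o true =
        (s, (pvFindAfter allC o cs i).getD (len-1), o) := by
  intro cs
  induction cs with
  | nil => intro i s o _ _; rfl
  | cons c cs ih =>
    intro i s o hi ho
    have hskip : ¬ (i = 0 ∧ c = '-') := by rintro ⟨h, _⟩; omega
    have hdo : decide (o < i) = true := by simp; omega
    by_cases hf : pvMemS opsF c = true
    · have hc : allC.contains c = true := by rw [← hfool]; exact hf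
      simp only [pvLoopA, if_neg hskip, Bool.not_true, Bool.false_and, Bool.false_eq_true,
        if_false, hf, Bool.and_true, if_true, true_and, pvFindAfter, hdo, hc, Option.getD_some]
    · have hc : allC.contains c = false := by rw [← hfool]; simpa using hf
      have hso : pvMemS so c = false := by
        cases h : pvMemS so c
        · rfl
        · have := hsub c h; rw [hc] at this; exact absurd this (by simp)
      simp only [pvLoopA, if_neg hskip, Bool.not_true, Bool.false_and, Bool.false_eq_true,
        if_false, hf, hc, hso, Bool.and_false, pvFindAfter]
      rw [ih (i+1) s o (by omega) (by omega)]

theorem loopA_main (so ops opsF : List String) (allC : List Char) (c0 : Option Char) (len : Int)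
    (hfool : ∀ c, pvMemS opsF c = allC.contains c)
    (hdisj : ∀ c, pvMemS ops c = true → pvMemS so c = false)
    (hsub : ∀ c, pvMemS so c = true → allC.contains c = true) :
    ∀ (cs : List Char) (i s : Int), 0 ≤ i → s ≤ i → (i = 0 → cs.head? = c0) →
      pvLoopA so ops opsF len cs i s 0 0 false =
        match pvPivotB c0 so cs i with
        | none => (pvMaxAll c0 ops cs i s, 0, 0)
        | some o => (pvMaxBefore c0 ops o cs i s, (pvFindAfter allC o cs i).getD (len-1), o) := by
  intro cs
  induction cs with
  | nil => intro i s _ _ _; rfl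
  | cons c cs ih =>
    intro i s hi hs hc0
    by_cases hskip : i = 0 ∧ c = '-'
    · -- leading '-' at index 0: every scan steps over it unchanged
      obtain ⟨hi0, hcm⟩ := hskip
      have hc0' : c0 = some '-' := by rw [← hc0 hi0]; simp [hcm]
      have hok : pvOk c0 i = false := by simp [pvOk, hi0, hc0']
      have hA : pvLoopA so ops opsF len (c :: cs) i s 0 0 false
          = pvLoopA so ops opsF len cs (i+1) s 0 0 false := by
        simp only [pvLoopA]; rw [if_pos ⟨hi0, hcm⟩]
      have hP : pvPivotB c0 so (c :: cs) i = pvPivotB c0 so cs (i+1) := by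
        simp [pvPivotB, hok]
      have hM : pvMaxAll c0 ops (c :: cs) i s = pvMaxAll c0 ops cs (i+1) s := by
        simp [pvMaxAll, hok]
      rw [hA, ih (i+1) s (by omega) (by omega) (by omega), hP]
      cases hpiv : pvPivotB c0 so cs (i+1) with
      | none => rw [hpiv] at *; simp only [hM]
      | some o =>
        have hoi : i + 1 ≤ o := pivot_ge c0 so cs (i+1) o hpiv
        have hMB : pvMaxBefore c0 ops o (c :: cs) i s = pvMaxBefore c0 ops o cs (i+1) s := by
          simp [pvMaxBefore, hok]
        have hFA : pvFindAfter allC o (c :: cs) i = pvFindAfter allC o cs (i+1) := by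
          have hd : (o < i) = False := by simp; omega
          simp [pvFindAfter, hd]
        simp only [hMB, hFA]
    · have hok : pvOk c0 i = true := by
        by_cases hi0 : i = 0
        · have hc : c0 = some c := by rw [← hc0 hi0]; rfl
          have hcne : ¬ c = '-' := fun h => hskip ⟨hi0, h⟩
          simp [pvOk, hc, hcne]
        · simp [pvOk, hi0]
      by_cases hso : pvMemS so c = true
      · -- the pivot operator is found at index i
        have hopsA : pvMemS ops c = false := by
          cases h : pvMemS ops c
          · rfl
          · have := hdisj c h; rw [hso] at this; exact absurd this (by simp)
        have hA : pvLoopA so ops opsF len (c :: cs) i s 0 0 false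
            = pvLoopA so ops opsF len cs (i+1) s (len-1) i true := by
          simp only [pvLoopA]; rw [if_neg hskip]; simp [hopsA, hso]
        have hP : pvPivotB c0 so (c :: cs) i = some i := by
          simp [pvPivotB, hok, hso]
        rw [hA, loopA_found so ops opsF allC len hfool hsub cs (i+1) s i (by omega) (by omega), hP]
        have hMB : pvMaxBefore c0 ops i (c :: cs) i s = s := by
          simp only [pvMaxBefore]
          rw [if_neg (by simp)]
          exact maxBefore_past c0 ops cs (i+1) s i (by omega)
        have hFA : pvFindAfter allC i (c :: cs) i = pvFindAfter allC i cs (i+1) := by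
          simp [pvFindAfter]
        simp only [hMB, hFA]
      · have hso' : pvMemS so c = false := by simpa using hso
        have hP : pvPivotB c0 so (c :: cs) i = pvPivotB c0 so cs (i+1) := by
          simp [pvPivotB, hso']
        by_cases hopsA : pvMemS ops c = true
        · -- an operand boundary before the pivot: ind_s becomes i+1
          have hA : pvLoopA so ops opsF len (c :: cs) i s 0 0 false
              = pvLoopA so ops opsF len cs (i+1) (i+1) 0 0 false := by
            simp only [pvLoopA]; rw [if_neg hskip]; simp [hopsA]
          have hmax : max s (i+1) = i+1 := by omega
          rw [hA, ih (i+1) (i+1) (by omega) (by omega) (by omega), hP]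
          cases hpiv : pvPivotB c0 so cs (i+1) with
          | none =>
            have hM : pvMaxAll c0 ops (c :: cs) i s = pvMaxAll c0 ops cs (i+1) (i+1) := by
              simp [pvMaxAll, hok, hopsA, hmax]
            simp only [hM]
          | some o =>
            have hoi : i + 1 ≤ o := pivot_ge c0 so cs (i+1) o hpiv
            have hMB : pvMaxBefore c0 ops o (c :: cs) i s = pvMaxBefore c0 ops o cs (i+1) (i+1) := by
              have h1 : (i < o) = True := by simp; omega
              simp [pvMaxBefore, h1, hok, hopsA, hmax]
            have hFA : pvFindAfter allC o (c :: cs) i = pvFindAfter allC o cs (i+1) := by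
              have hd : (o < i) = False := by simp; omega
              simp [pvFindAfter, hd]
            simp only [hMB, hFA]
        · -- an inert character: every scan skips it
          have hopsA' : pvMemS ops c = false := by simpa using hopsA
          have hA : pvLoopA so ops opsF len (c :: cs) i s 0 0 false
              = pvLoopA so ops opsF len cs (i+1) s 0 0 false := by
            simp only [pvLoopA]; rw [if_neg hskip]; simp [hopsA, hso']
          rw [hA, ih (i+1) s (by omega) (by omega) (by omega), hP]
          cases hpiv : pvPivotB c0 so cs (i+1) with
          | none =>
            have hM : pvMaxAll c0 ops (c :: cs) i s = pvMaxAll c0 ops cs (i+1) s := by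
              simp [pvMaxAll, hok, hopsA']
            simp only [hM]
          | some o =>
            have hoi : i + 1 ≤ o := pivot_ge c0 so cs (i+1) o hpiv
            have hMB : pvMaxBefore c0 ops o (c :: cs) i s = pvMaxBefore c0 ops o cs (i+1) s := by
              simp [pvMaxBefore, hok, hopsA']
            have hFA : pvFindAfter allC o (c :: cs) i = pvFindAfter allC o cs (i+1) := by
              have hd : (o < i) = False := by simp; omega
              simp [pvFindAfter, hd]
            simp only [hMB, hFA]

-- the foldl of remove? over a nodup base list containing all removed elements is a filter
theorem foldl_remove_eq_filter :
    ∀ (so l : List String), so.Nodup → (∀ s ∈ so, s ∈ l) → l.Nodup →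
      so.foldl (fun acc op => (PySem.List.remove? acc op).getD acc) l =
        l.filter (fun x => !so.contains x) := by
  intro so
  induction so with
  | nil => intro l _ _ _; simp
  | cons op rest ih =>
    intro l hnd hmem hl
    simp only [List.foldl_cons]
    have hop : op ∈ l := hmem op (by simp)
    rw [PySem.List.remove?_eq_some_erase l op hop]
    simp only [Option.getD_some]
    rw [ih (l.erase op) (List.nodup_cons.mp hnd).2
      (fun s hs => (List.mem_erase_of_ne
          (fun h => (List.nodup_cons.mp hnd).1 (by rw [← h]; exact hs))).mpr
        (hmem s (by simp [hs])))
      (hl.erase op)]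
    rw [List.Nodup.erase_eq_filter hl, List.filter_filter]
    congr 1
    funext x
    by_cases hx : x = op
    · subst hx
      simp
    · have hbeq : (op == x) = false := by simp [Ne.symm hx]
      simp [List.contains_cons, hbeq, hx]

theorem singleton_mem_four (c : Char) :
    (String.singleton c ∈ (["+", "-", "/", "*"] : List String)) ↔ c ∈ ("+-/*".toList) := by
  constructor
  · intro h
    simp only [List.mem_cons, List.not_mem_nil, or_false] at h
    have inj : ∀ {a b : Char}, String.singleton a = String.singleton b → a = b := by
      intro a b hab
      have h' := congrArg String.toList hab
      simp only [String.toList_singleton] at h'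
      injection h'
    rcases h with h | h | h | h
    · have := inj (h.trans (by decide : ("+" : String) = String.singleton '+')); simp [this]
    · have := inj (h.trans (by decide : ("-" : String) = String.singleton '-')); simp [this]
    · have := inj (h.trans (by decide : ("/" : String) = String.singleton '/')); simp [this]
    · have := inj (h.trans (by decide : ("*" : String) = String.singleton '*')); simp [this]
  · intro h
    have : c = '+' ∨ c = '-' ∨ c = '/' ∨ c = '*' := by simpa using h
    rcases this with h | h | h | h <;> subst h <;> decide

-- ===== VERDICT (by name: the statement is the Claim_ definition above) =====
theorem find_expression_spec : Claim_equal_find_expression := by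
  intro data so _ hpre
  unfold Spec_find_expression find_expression find_expression_alt
  obtain ⟨hnd, hmem⟩ := hpre
  have hrem : so.foldl (fun acc op => (PySem.List.remove? acc op).getD acc)
      (["+", "-", "/", "*"] : List String)
      = (["+", "-", "/", "*"] : List String).filter (fun x => !so.contains x) :=
    foldl_remove_eq_filter so _ hnd hmem (by decide)
  have hfool : ∀ c, pvMemS (["+", "-", "/", "*"] : List String) c = ("+-/*".toList).contains c := by
    intro c
    simp only [pvMemS, List.contains_eq_mem]
    rw [decide_eq_decide.mpr (singleton_mem_four c)]
  have hdisj : ∀ c, pvMemS (so.foldl (fun acc op => (PySem.List.remove? acc op).getD acc)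
        (["+", "-", "/", "*"] : List String)) c = true → pvMemS so c = false := by
    intro c h
    rw [hrem] at h
    simp only [pvMemS, List.contains_eq_mem, List.mem_filter, decide_eq_true_eq] at h
    simpa [pvMemS, List.contains_eq_mem] using h.2
  have hsub : ∀ c, pvMemS so c = true → ("+-/*".toList).contains c = true := by
    intro c h
    simp only [pvMemS, List.contains_eq_mem, decide_eq_true_eq] at h ⊢
    exact (singleton_mem_four c).mp (hmem _ h)
  rw [loopA_main so _ _ _ data.toList.head? (data.toList.length : Int)
    hfool hdisj hsub data.toList 0 0 (by omega) (by omega) (fun _ => rfl)]
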